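-- pv_equiv track=rewrite | github.com/yok-tottii/FleDjSON | src/managers/search_manager.py | _find_matched_field_paths
-- ===== SOURCE A (Python) =====
-- from typing import Dict, List, Any, Optional, Callable, Tuple, Set
--
-- def _find_matched_field_paths(item: Dict[str, Any], search_term_lower: str) -> List[str]:
--     """
--     検索インデックス項目からマッチしたフィールドパスを特定する
--
--     より具体的なパス（リーフノード）のみを返し、親パスは除外する
--
--     Args:
--         item: 検索インデックスの項目
--         search_term_lower: 小文字に変換された検索語
--
--     Returns:
--         マッチしたフィールドパスのリスト（最も具体的なパスのみ）
--     """
--     matched_paths = []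
--     field_text_map = item.get("field_text_map", {})
--
--     for field_path, field_text in field_text_map.items():
--         if search_term_lower in field_text:
--             matched_paths.append(field_path)
--
--     if not matched_paths:
--         return []
--
--     # マッチしたパスを優先度でソート（より具体的なパスを先に）
--     # 例: "profile.email" は "profile" より優先
--     matched_paths.sort(key=lambda x: (-x.count('.'), -x.count('['), x))
--
--     # 親パスを除外（子パスが存在する場合）
--     # 例: ["organization.name", "organization"] → ["organization.name"]
--     filtered_paths = []
--     for path in matched_paths:
--         # このパスが他のマッチしたパスの親でないかチェック
--         is_parent = False
--         for other_path in matched_paths: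
--             if other_path != path and (
--                 other_path.startswith(path + ".") or
--                 other_path.startswith(path + "[")
--             ):
--                 is_parent = True
--                 break
--         if not is_parent:
--             filtered_paths.append(path)
--
--     return filtered_paths
-- ===== SOURCE B (Python) =====
-- def _find_matched_field_paths(item, search_term_lower):
--     field_text_map = item.get("field_text_map", {})
--     matched_paths = [p for p, text in field_text_map.items() if search_term_lower in text]
--     if not matched_paths:
--         return []
--     matched_paths.sort(key=lambda x: (-x.count('.'), -x.count('['), x))
--     # one pass: collect every ancestor prefix (the part before each '.' or '[')
--     parents = set()
--     for q in matched_paths: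
--         for i, ch in enumerate(q):
--             if ch == '.' or ch == '[':
--                 parents.add(q[:i])
--     return [p for p in matched_paths if p not in parents]
-- ===== Notes on version B (the rewrite author's own statement) =====
-- stated objective: alternative
-- what changed: A's nested parent-elimination (for every matched path, scan all matched paths for a child starting with path+'.' or path+'[') is replaced by one pass that collects every separator-cut prefix of the matched paths into a set and then keeps exactly the paths not in that set.
import Mathlib
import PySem

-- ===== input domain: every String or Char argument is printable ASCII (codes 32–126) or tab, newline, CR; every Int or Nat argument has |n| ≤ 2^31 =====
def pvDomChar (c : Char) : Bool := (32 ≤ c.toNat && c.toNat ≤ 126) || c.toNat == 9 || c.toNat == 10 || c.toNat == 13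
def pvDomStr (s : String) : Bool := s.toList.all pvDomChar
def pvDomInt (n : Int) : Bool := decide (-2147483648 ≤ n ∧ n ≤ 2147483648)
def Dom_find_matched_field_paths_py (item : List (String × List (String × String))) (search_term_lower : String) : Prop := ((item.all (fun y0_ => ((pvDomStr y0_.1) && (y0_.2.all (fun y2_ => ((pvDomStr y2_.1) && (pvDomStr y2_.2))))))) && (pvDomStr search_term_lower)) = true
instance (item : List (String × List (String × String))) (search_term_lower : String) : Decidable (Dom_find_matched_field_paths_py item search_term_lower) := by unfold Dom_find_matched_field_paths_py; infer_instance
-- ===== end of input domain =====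

-- B replaces A's nested parent check (for each matched path, scan all matched paths for a child)
-- by one pass collecting every separator-cut prefix into a set; objective: alternative algorithm.


-- ===== PORT A =====
-- sort key of both Pythons: lambda x: (-x.count('.'), -x.count('['), x); Python's tuple order is
-- the lexicographic order ×ₗ, Python's str order is Lean's '<' on String (code points).
def pvSortKey (x : String) : Int ×ₗ (Int ×ₗ String) :=
  toLex (-(PySem.Str.count x "." : Int), toLex (-(PySem.Str.count x "[" : Int), x))

-- literal port of A; 'path + "."' is ported on code-point lists (path.toList ++ ['.']), which is
-- exactly Python string concatenation; the inner for/break loop is the usual 'any'.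
def find_matched_field_paths_py (item : List (String × List (String × String))) (search_term_lower : String) : List String :=
  let field_text_map := (item.lookup "field_text_map").getD []
  let matched_paths := field_text_map.foldl
    (fun acc p => if PySem.Str.isIn search_term_lower p.2 then acc ++ [p.1] else acc) []
  if matched_paths = [] then []
  else
    let ms := PySem.List.sorted matched_paths pvSortKey false
    ms.foldl (fun acc path =>
      let is_parent := ms.any (fun other =>
        other != path &&
          (PySem.Chars.startswith other.toList (path.toList ++ ['.']) ||
           PySem.Chars.startswith other.toList (path.toList ++ ['['])))
      if is_parent then acc else acc ++ [path]) []

-- ===== PORT B =====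
-- B's inner loop 'for i, ch in enumerate(q): if ch == "." or ch == "[": parents.add(q[:i])'
def pvAddSepPrefixes (q : String) (s : PySem.Set (List Char)) : PySem.Set (List Char) :=
  (PySem.List.enumerate q.toList).foldl
    (fun s ic => if ic.2 == '.' || ic.2 == '[' then s.add (PySem.List.slice q.toList none (some ic.1)) else s) s

def find_matched_field_paths_py_alt (item : List (String × List (String × String))) (search_term_lower : String) : List String :=
  let field_text_map := (item.lookup "field_text_map").getD []
  let matched_paths := field_text_map.filterMap
    (fun p => if PySem.Str.isIn search_term_lower p.2 then some p.1 else none)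
  if matched_paths = [] then []
  else
    let ms := PySem.List.sorted matched_paths pvSortKey false
    let parents := ms.foldl (fun s q => pvAddSepPrefixes q s) PySem.Set.empty
    ms.filter (fun p => !(parents.contains p.toList))

-- ===== PRECONDITION & SPEC =====
def Spec_find_matched_field_paths_py (item : List (String × List (String × String))) (search_term_lower : String) (out : List String) : Prop := out = find_matched_field_paths_py_alt item search_term_lower
instance (item : List (String × List (String × String))) (search_term_lower : String) (out : List String) : Decidable (Spec_find_matched_field_paths_py item search_term_lower out) := by unfold Spec_find_matched_field_paths_py; infer_instance

-- ===== CLAIM (what is proved, stated in full; the proofs are below) =====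
def Claim_equal_find_matched_field_paths_py : Prop := ∀ (item : List (String × List (String × String))) (search_term_lower : String), Dom_find_matched_field_paths_py item search_term_lower → Spec_find_matched_field_paths_py item search_term_lower (find_matched_field_paths_py item search_term_lower)

-- ===== LEMMAS AND PROOFS =====

-- a guarded filterMap is map-of-filter
lemma pv_filterMap_if {α β : Type} (p : α → Bool) (f : α → β) (l : List α) :
    l.filterMap (fun x => if p x then some (f x) else none) = (l.filter p).map f := by
  induction l with
  | nil => rfl
  | cons x t ih =>
    by_cases h : p x = true <;> simp [h, ih]

-- the two ways of building matched_paths agree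
lemma pv_matched_eq (stl : String) (l : List (String × String)) :
    l.foldl (fun acc p => if PySem.Str.isIn stl p.2 then acc ++ [p.1] else acc) [] =
    l.filterMap (fun p => if PySem.Str.isIn stl p.2 then some p.1 else none) := by
  rw [PySem.List.foldl_append_if (fun p => PySem.Str.isIn stl p.2) (·.1) l [],
    pv_filterMap_if (fun p => PySem.Str.isIn stl p.2) (·.1) l]
  rfl

-- membership in a fold of conditional Set.add
lemma pv_mem_foldl_add_if {α β : Type} [BEq α] [LawfulBEq α] (P : β → Bool) (g : β → α)
    (l : List β) (s : PySem.Set α) (x : α) :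
    x ∈ l.foldl (fun s b => if P b then s.add (g b) else s) s ↔
      x ∈ s ∨ ∃ b ∈ l, P b = true ∧ x = g b := by
  induction l generalizing s with
  | nil => simp
  | cons b t ih =>
    rw [List.foldl_cons]
    by_cases h : P b = true
    · rw [if_pos h, ih]
      simp only [PySem.Set.mem_add, List.mem_cons]
      constructor
      · rintro ((hs | rfl) | ⟨b', hb', hP, hx⟩)
        · exact Or.inl hs
        · exact Or.inr ⟨b, Or.inl rfl, h, rfl⟩
        · exact Or.inr ⟨b', Or.inr hb', hP, hx⟩
      · rintro (hs | ⟨b', hb', hP, hx⟩)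
        · exact Or.inl (Or.inl hs)
        · rcases hb' with rfl | hb'
          · exact Or.inl (Or.inr hx)
          · exact Or.inr ⟨b', hb', hP, hx⟩
    · rw [if_neg h, ih]
      simp only [List.mem_cons]
      constructor
      · rintro (hs | ⟨b', hb', hP, hx⟩)
        · exact Or.inl hs
        · exact Or.inr ⟨b', Or.inr hb', hP, hx⟩
      · rintro (hs | ⟨b', hb', hP, hx⟩)
        · exact Or.inl hs
        · rcases hb' with rfl | hb'
          · exact absurd hP h
          · exact Or.inr ⟨b', hb', hP, hx⟩

-- 'ps ++ [c] is a prefix of cs' ↔ 'cs has c at position k with cs.take k = ps'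
lemma pv_prefix_concat_iff (cs ps : List Char) (c : Char) :
    ps ++ [c] <+: cs ↔ ∃ k, ∃ h : k < cs.length, cs[k] = c ∧ ps = cs.take k := by
  constructor
  · rintro ⟨t, ht⟩
    refine ⟨ps.length, ?_, ?_, ?_⟩ <;> subst ht <;> simp
  · rintro ⟨k, hk, hc, hp⟩
    subst hp
    have : cs.take k ++ [c] = cs.take (k + 1) := by
      rw [List.take_add_one]
      simp [List.getElem?_eq_getElem hk, hc]
    rw [this]
    exact List.take_prefix _ _

-- one step of B's prefix collection
lemma pv_mem_addSepPrefixes (q : String) (s : PySem.Set (List Char)) (x : List Char) :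
    x ∈ pvAddSepPrefixes q s ↔ x ∈ s ∨ ∃ k, ∃ h : k < q.toList.length,
      (q.toList[k] = '.' ∨ q.toList[k] = '[') ∧ x = q.toList.take k := by
  unfold pvAddSepPrefixes
  rw [pv_mem_foldl_add_if]
  constructor
  · rintro (hs | ⟨b, hb, hP, hx⟩)
    · exact Or.inl hs
    · rw [PySem.List.mem_enumerate_iff] at hb
      obtain ⟨k, hk, rfl⟩ := hb
      refine Or.inr ⟨k, hk, ?_, ?_⟩
      · simpa using hP
      · simpa [PySem.List.slice_to_natCast] using hx
  · rintro (hs | ⟨k, hk, hc, hx⟩)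
    · exact Or.inl hs
    · refine Or.inr ⟨((0 : Int) + k, q.toList[k]), ?_, ?_, ?_⟩
      · rw [PySem.List.mem_enumerate_iff]; exact ⟨k, hk, rfl⟩
      · rcases hc with hc | hc <;> simp [hc]
      · simpa [PySem.List.slice_to_natCast] using hx

-- membership in B's full 'parents' set
lemma pv_mem_parents (l : List String) (s : PySem.Set (List Char)) (x : List Char) :
    x ∈ l.foldl (fun s q => pvAddSepPrefixes q s) s ↔
      x ∈ s ∨ ∃ q ∈ l, ∃ k, ∃ h : k < q.toList.length,
        (q.toList[k] = '.' ∨ q.toList[k] = '[') ∧ x = q.toList.take k := by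
  induction l generalizing s with
  | nil => simp
  | cons q t ih =>
    rw [List.foldl_cons, ih, pv_mem_addSepPrefixes]
    constructor
    · rintro ((hs | ⟨k, hk, hc, hx⟩) | ⟨q', hq', hrest⟩)
      · exact Or.inl hs
      · exact Or.inr ⟨q, List.mem_cons_self .., k, hk, hc, hx⟩
      · exact Or.inr ⟨q', List.mem_cons_of_mem _ hq', hrest⟩
    · rintro (hs | ⟨q', hq', hrest⟩)
      · exact Or.inl (Or.inl hs)
      · rcases List.mem_cons.mp hq' with rfl | hq'
        · exact Or.inl (Or.inr hrest)
        · exact Or.inr ⟨q', hq', hrest⟩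

-- A's inner scan and B's set lookup decide the same property
lemma pv_cond_eq (ms : List String) (path : String) :
    (ms.any (fun other =>
        other != path &&
          (PySem.Chars.startswith other.toList (path.toList ++ ['.']) ||
           PySem.Chars.startswith other.toList (path.toList ++ ['['])))) =
    ((ms.foldl (fun s q => pvAddSepPrefixes q s) PySem.Set.empty).contains path.toList) := by
  rw [Bool.eq_iff_iff, List.any_eq_true]
  have hcont : ((ms.foldl (fun s q => pvAddSepPrefixes q s) PySem.Set.empty).contains path.toList = true)
      ↔ path.toList ∈ ms.foldl (fun s q => pvAddSepPrefixes q s) PySem.Set.empty := by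
    simp
  rw [hcont, pv_mem_parents]
  simp only [Bool.and_eq_true, bne_iff_ne, Bool.or_eq_true, PySem.Chars.startswith_iff,
    PySem.Set.empty, List.not_mem_nil, false_or]
  constructor
  · rintro ⟨other, ho, -, hp | hp⟩ <;>
      · rw [pv_prefix_concat_iff] at hp
        obtain ⟨k, hk, hc, hps⟩ := hp
        exact ⟨other, ho, k, hk, by simp [hc], hps⟩
  · rintro ⟨q, hq, k, hk, hc, hx⟩
    have hpre : path.toList ++ [q.toList[k]] <+: q.toList := by
      rw [pv_prefix_concat_iff]; exact ⟨k, hk, rfl, hx⟩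
    have hne : q ≠ path := by
      intro hqp
      have hlen := hpre.length_le
      have hql : q.toList.length = path.toList.length := by rw [hqp]
      simp only [List.length_append, List.length_cons, List.length_nil] at hlen
      omega
    refine ⟨q, hq, hne, ?_⟩
    rcases hc with hc | hc
    · exact Or.inl (by rwa [← hc])
    · exact Or.inr (by rwa [← hc])

-- A's output fold is B's filter
lemma pv_filter_eq (ms : List String) :
    ms.foldl (fun acc path =>
      if ms.any (fun other =>
        other != path &&
          (PySem.Chars.startswith other.toList (path.toList ++ ['.']) ||
           PySem.Chars.startswith other.toList (path.toList ++ ['['])))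
      then acc else acc ++ [path]) [] =
    ms.filter (fun p => !((ms.foldl (fun s q => pvAddSepPrefixes q s) PySem.Set.empty).contains p.toList)) := by
  have h1 : ms.foldl (fun acc path =>
      if ms.any (fun other =>
        other != path &&
          (PySem.Chars.startswith other.toList (path.toList ++ ['.']) ||
           PySem.Chars.startswith other.toList (path.toList ++ ['['])))
      then acc else acc ++ [path]) [] =
      ms.foldl (fun acc path =>
        if (!((ms.foldl (fun s q => pvAddSepPrefixes q s) PySem.Set.empty).contains path.toList))
        then acc ++ [path] else acc) [] := by
    apply PySem.List.foldl_congr_mem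
    intro acc path _
    rw [← pv_cond_eq ms path]
    rcases ms.any (fun other =>
        other != path &&
          (PySem.Chars.startswith other.toList (path.toList ++ ['.']) ||
           PySem.Chars.startswith other.toList (path.toList ++ ['[']))) <;> rfl
  rw [h1]
  simpa using PySem.List.foldl_append_if
    (fun p => !((ms.foldl (fun s q => pvAddSepPrefixes q s) PySem.Set.empty).contains p.toList)) id ms []

-- ===== VERDICT (by name: the statement is the Claim_ definition above) =====
theorem find_matched_field_paths_py_spec : Claim_equal_find_matched_field_paths_py := by
  intro item stl _
  unfold Spec_find_matched_field_paths_py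
  simp only [find_matched_field_paths_py, find_matched_field_paths_py_alt]
  rw [pv_matched_eq]
  split
  · rfl
  · exact pv_filter_eq _
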